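-- pv_equiv track=rewrite | github.com/fwang12345/nonogram-solver | solver.py | cell_shade
-- ===== SOURCE A (Python) =====
-- def grid_id(size, row, col):
--     if (row >= size or col >= size):
--         raise Exception('Row or column out of bounds');
--     return row * size + col + 1;
--
-- def cell_shade(size, rows, cols, rows_range, cols_range, rows_id, cols_id):
--     clauses = []
--     for r in range(size):
--         for c in range(size):
--             clause = [-grid_id(size, r, c)]
--             for p in range(len(rows[r])):
--                 pat_len = rows[r][p]
--                 pat_id = rows_id[r][p]
--                 lower, upper = rows_range[r][p]
--                 for start in range(max(c-pat_len+1, lower), min(c+1, upper)):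
--                     clause.append(pat_id + start)
--             clauses.append(clause)
--             clause = [-grid_id(size, r, c)]
--             for p in range(len(cols[c])):
--                 pat_len = cols[c][p]
--                 pat_id = cols_id[c][p]
--                 lower, upper = cols_range[c][p]
--                 for start in range(max(r-pat_len+1, lower), min(r+1, upper)):
--                     clause.append(pat_id + start)
--             clauses.append(clause)
--     return clauses
-- ===== SOURCE B (Python) =====
-- def _scatter(size, base, stride, pats, rngs, ids):
--     """Seed one clause per cell, then scatter each pattern placement into the
--     cells it covers (pattern index outer, start ascending, so literal order
--     inside every clause matches ascending-start per pattern)."""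
--     tab = [[-(base + i * stride)] for i in range(size)]
--     for p in range(len(pats)):
--         pat_len = pats[p]
--         pid = ids[p]
--         lo, up = rngs[p]
--         for s in range(lo, up):
--             for c in range(max(s, 0), min(s + pat_len, size)):
--                 tab[c].append(pid + s)
--     return tab
--
-- def cell_shade(size, rows, cols, rows_range, cols_range, rows_id, cols_id):
--     row_tab = [_scatter(size, r * size + 1, 1, rows[r], rows_range[r], rows_id[r])
--                for r in range(size)]
--     col_tab = [_scatter(size, c + 1, size, cols[c], cols_range[c], cols_id[c])
--                for c in range(size)]
--     out = []
--     for r in range(size):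
--         for c in range(size):
--             out.append(row_tab[r][c])
--             out.append(col_tab[c][r])
--     return out
-- ===== Notes on version B (the rewrite author's own statement) =====
-- stated objective: faster
-- what changed: B replaces A's per-cell gather (which recomputes every pattern's start window for each of the size^2 cells) by a per-line scatter: each pattern placement is appended once into indexed per-cell clause tables, which are then flattened in A's interleaved order.
import Mathlib
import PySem

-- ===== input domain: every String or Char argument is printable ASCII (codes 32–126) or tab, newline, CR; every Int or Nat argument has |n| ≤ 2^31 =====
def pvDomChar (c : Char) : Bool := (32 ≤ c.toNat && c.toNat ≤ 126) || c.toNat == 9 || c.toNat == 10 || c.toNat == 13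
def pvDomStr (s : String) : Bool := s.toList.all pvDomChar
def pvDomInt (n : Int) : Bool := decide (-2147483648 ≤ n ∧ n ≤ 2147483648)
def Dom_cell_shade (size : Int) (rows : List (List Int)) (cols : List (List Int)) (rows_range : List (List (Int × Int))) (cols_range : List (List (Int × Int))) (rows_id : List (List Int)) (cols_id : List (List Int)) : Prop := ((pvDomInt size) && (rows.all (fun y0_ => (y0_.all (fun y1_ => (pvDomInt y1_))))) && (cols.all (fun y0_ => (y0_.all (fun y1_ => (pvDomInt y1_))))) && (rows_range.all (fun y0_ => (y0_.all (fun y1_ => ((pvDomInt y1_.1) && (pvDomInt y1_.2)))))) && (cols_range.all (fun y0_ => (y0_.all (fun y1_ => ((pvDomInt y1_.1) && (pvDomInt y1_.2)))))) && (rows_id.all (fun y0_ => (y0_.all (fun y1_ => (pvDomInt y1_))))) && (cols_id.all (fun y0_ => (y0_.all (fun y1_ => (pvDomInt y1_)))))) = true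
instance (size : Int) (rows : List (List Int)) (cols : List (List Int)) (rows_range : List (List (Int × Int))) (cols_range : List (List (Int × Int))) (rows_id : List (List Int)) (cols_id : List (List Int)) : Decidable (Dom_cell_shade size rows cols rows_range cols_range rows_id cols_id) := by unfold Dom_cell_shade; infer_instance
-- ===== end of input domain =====

-- B replaces A's per-cell gather (recomputing each pattern's start window for every cell)
-- by per-line scatter tables: each pattern placement is appended once to the clauses of the
-- cells it covers, and the tables are then flattened in A's interleaved order (alternative
-- decomposition; literal order inside each clause is preserved).

-- ===== PORT A =====
-- Python's grid_id raises when row >= size or col >= size; that branch is unreachable from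
-- cell_shade's loops (r, c ∈ range(size)), so the port returns 0 there.
def grid_id (size row col : Int) : Int :=
  if size ≤ row ∨ size ≤ col then 0 else row * size + col + 1

def cell_shade (size : Int) (rows : List (List Int)) (cols : List (List Int)) (rows_range : List (List (Int × Int))) (cols_range : List (List (Int × Int))) (rows_id : List (List Int)) (cols_id : List (List Int)) : List (List Int) :=
  (PySem.List.pyRange 0 size 1).foldl (fun clauses r =>
    (PySem.List.pyRange 0 size 1).foldl (fun clauses c =>
      let clause :=
        (PySem.List.pyRange 0 ((PySem.List.pyGetD rows r []).length : Int) 1).foldl (fun clause p =>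
          let pat_len := PySem.List.pyGetD (PySem.List.pyGetD rows r []) p 0
          let pat_id := PySem.List.pyGetD (PySem.List.pyGetD rows_id r []) p 0
          let lu := PySem.List.pyGetD (PySem.List.pyGetD rows_range r []) p (0, 0)
          (PySem.List.pyRange (max (c - pat_len + 1) lu.1) (min (c + 1) lu.2) 1).foldl
            (fun clause start => clause ++ [pat_id + start]) clause)
          [-(grid_id size r c)]
      let clauses := clauses ++ [clause]
      let clause :=
        (PySem.List.pyRange 0 ((PySem.List.pyGetD cols c []).length : Int) 1).foldl (fun clause p =>
          let pat_len := PySem.List.pyGetD (PySem.List.pyGetD cols c []) p 0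
          let pat_id := PySem.List.pyGetD (PySem.List.pyGetD cols_id c []) p 0
          let lu := PySem.List.pyGetD (PySem.List.pyGetD cols_range c []) p (0, 0)
          (PySem.List.pyRange (max (r - pat_len + 1) lu.1) (min (r + 1) lu.2) 1).foldl
            (fun clause start => clause ++ [pat_id + start]) clause)
          [-(grid_id size r c)]
      clauses ++ [clause]) clauses) []

-- ===== PORT B =====
-- _scatter from Source B: seed one clause per cell, then append each placement's literal to
-- every cell it covers (Python's tab[c].append → List.modify at c.toNat; c ≥ 0 in the loop).
def scatterB (size base stride : Int) (pats : List Int) (rngs : List (Int × Int)) (ids : List Int) : List (List Int) :=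
  (PySem.List.pyRange 0 (pats.length : Int) 1).foldl (fun tab p =>
    let pat_len := PySem.List.pyGetD pats p 0
    let pid := PySem.List.pyGetD ids p 0
    let lu := PySem.List.pyGetD rngs p (0, 0)
    (PySem.List.pyRange lu.1 lu.2 1).foldl (fun tab s =>
      (PySem.List.pyRange (max s 0) (min (s + pat_len) size) 1).foldl
        (fun tab c => tab.modify c.toNat (fun cl => cl ++ [pid + s])) tab) tab)
    ((PySem.List.pyRange 0 size 1).map (fun i => [-(base + i * stride)]))

def cell_shade_alt (size : Int) (rows : List (List Int)) (cols : List (List Int)) (rows_range : List (List (Int × Int))) (cols_range : List (List (Int × Int))) (rows_id : List (List Int)) (cols_id : List (List Int)) : List (List Int) :=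
  let row_tab := (PySem.List.pyRange 0 size 1).map (fun r =>
    scatterB size (r * size + 1) 1 (PySem.List.pyGetD rows r []) (PySem.List.pyGetD rows_range r []) (PySem.List.pyGetD rows_id r []))
  let col_tab := (PySem.List.pyRange 0 size 1).map (fun c =>
    scatterB size (c + 1) size (PySem.List.pyGetD cols c []) (PySem.List.pyGetD cols_range c []) (PySem.List.pyGetD cols_id c []))
  (PySem.List.pyRange 0 size 1).foldl (fun out r =>
    (PySem.List.pyRange 0 size 1).foldl (fun out c =>
      (out ++ [PySem.List.pyGetD (PySem.List.pyGetD row_tab r []) c []]) ++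
        [PySem.List.pyGetD (PySem.List.pyGetD col_tab c []) r []]) out) []

-- ===== PRECONDITION & SPEC =====
-- Pre_ = exactly the inputs where Python A returns (no IndexError): every row/column index
-- below size is in range, and wherever a line's pattern list is nonempty its range and id
-- lists are at least as long (those lists are only indexed when the pattern loop runs).
def Pre_cell_shade (size : Int) (rows : List (List Int)) (cols : List (List Int)) (rows_range : List (List (Int × Int))) (cols_range : List (List (Int × Int))) (rows_id : List (List Int)) (cols_id : List (List Int)) : Prop :=
  size ≤ (rows.length : Int) ∧ size ≤ (cols.length : Int) ∧
  (∀ i, i < min size.toNat rows.length →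
     (rows.getD i [] ≠ [] → i < rows_range.length ∧ i < rows_id.length ∧
        (rows.getD i []).length ≤ (rows_range.getD i []).length ∧
        (rows.getD i []).length ≤ (rows_id.getD i []).length)) ∧
  (∀ i, i < min size.toNat cols.length →
     (cols.getD i [] ≠ [] → i < cols_range.length ∧ i < cols_id.length ∧
        (cols.getD i []).length ≤ (cols_range.getD i []).length ∧
        (cols.getD i []).length ≤ (cols_id.getD i []).length))
instance (size : Int) (rows : List (List Int)) (cols : List (List Int)) (rows_range : List (List (Int × Int))) (cols_range : List (List (Int × Int))) (rows_id : List (List Int)) (cols_id : List (List Int)) : Decidable (Pre_cell_shade size rows cols rows_range cols_range rows_id cols_id) := by unfold Pre_cell_shade; infer_instance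

def pvWitness_cell_shade : Int × List (List Int) × List (List Int) × (List (List (Int × Int))) × (List (List (Int × Int))) × List (List Int) × List (List Int) :=
  (2, [[1], [1]], [[1], [1]], [[(0, 2)], [(0, 2)]], [[(0, 2)], [(0, 2)]], [[5], [7]], [[9], [11]])

def Spec_cell_shade (size : Int) (rows : List (List Int)) (cols : List (List Int)) (rows_range : List (List (Int × Int))) (cols_range : List (List (Int × Int))) (rows_id : List (List Int)) (cols_id : List (List Int)) (out : List (List Int)) : Prop := out = cell_shade_alt size rows cols rows_range cols_range rows_id cols_id
instance (size : Int) (rows : List (List Int)) (cols : List (List Int)) (rows_range : List (List (Int × Int))) (cols_range : List (List (Int × Int))) (rows_id : List (List Int)) (cols_id : List (List Int)) (out : List (List Int)) : Decidable (Spec_cell_shade size rows cols rows_range cols_range rows_id cols_id out) := by unfold Spec_cell_shade; infer_instance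

-- ===== CLAIM (what is proved, stated in full; the proofs are below) =====
def Claim_equal_cell_shade : Prop := ∀ (size : Int) (rows : List (List Int)) (cols : List (List Int)) (rows_range : List (List (Int × Int))) (cols_range : List (List (Int × Int))) (rows_id : List (List Int)) (cols_id : List (List Int)), Dom_cell_shade size rows cols rows_range cols_range rows_id cols_id → Pre_cell_shade size rows cols rows_range cols_range rows_id cols_id → Spec_cell_shade size rows cols rows_range cols_range rows_id cols_id (cell_shade size rows cols rows_range cols_range rows_id cols_id)

-- ===== LEMMAS AND PROOFS =====

-- The per-pattern start window that A computes for a cell at position c.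
def windowL (lo up len c : Int) : List Int :=
  PySem.List.pyRange (max (c - len + 1) lo) (min (c + 1) up) 1

-- The clause A builds for one cell of one line (negated grid literal, then for each
-- pattern in order the literals of its admissible starts, ascending).
def gatherClause (neg : Int) (pats : List Int) (rngs : List (Int × Int)) (ids : List Int) (c : Int) : List Int :=
  [neg] ++ (PySem.List.pyRange 0 (pats.length : Int) 1).flatMap (fun p =>
    (windowL (PySem.List.pyGetD rngs p (0, 0)).1 (PySem.List.pyGetD rngs p (0, 0)).2
        (PySem.List.pyGetD pats p 0) c).map (fun s => PySem.List.pyGetD ids p 0 + s))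

-- A's per-cell double loop is exactly gatherClause.
theorem a_clause (pats : List Int) (rngs : List (Int × Int)) (ids : List Int) (neg c : Int) :
    (PySem.List.pyRange 0 (pats.length : Int) 1).foldl (fun clause p =>
        (PySem.List.pyRange (max (c - PySem.List.pyGetD pats p 0 + 1) (PySem.List.pyGetD rngs p (0, 0)).1)
            (min (c + 1) (PySem.List.pyGetD rngs p (0, 0)).2) 1).foldl
          (fun clause start => clause ++ [PySem.List.pyGetD ids p 0 + start]) clause) [neg]
      = gatherClause neg pats rngs ids c := by
  simp only [PySem.List.foldl_append_singleton_eq_map, PySem.List.foldl_append_eq_flatMap,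
    gatherClause, windowL]

-- One start's inner scatter loop, seen from a fixed cell j: it appends [v] iff a ≤ j < b.
theorem scatter_cells_getElem?_aux (j : Nat) (v : Int) :
    ∀ (n : Nat) (a b : Int), 0 ≤ a → n = (b - a).toNat → ∀ (tab : List (List Int)),
      ((PySem.List.pyRange a b 1).foldl (fun tab c => tab.modify c.toNat (fun cl => cl ++ [v])) tab)[j]? =
        tab[j]?.map (fun cl => if a ≤ (j : Int) ∧ (j : Int) < b then cl ++ [v] else cl) := by
  intro n
  induction n with
  | zero =>
    intro a b ha hn tab
    rw [PySem.List.pyRange_one_eq_nil (by omega)]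
    have hcond : ¬ (a ≤ (j : Int) ∧ (j : Int) < b) := by omega
    simp only [List.foldl_nil]
    cases tab[j]? <;> simp [hcond]
  | succ n ih =>
    intro a b ha hn tab
    have hab : a < b := by omega
    rw [PySem.List.pyRange_one_cons hab]
    simp only [List.foldl_cons]
    rw [ih (a + 1) b (by omega) (by omega)]
    rw [List.getElem?_modify]
    cases tab[j]? with
    | none => simp
    | some cl =>
      simp only [Option.map_eq_map, Option.map_some, Option.some.injEq]
      by_cases h : a.toNat = j
      · rw [if_pos h, if_neg (by omega), if_pos (by omega)]
      · rw [if_neg h]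
        by_cases h2 : a + 1 ≤ (j : Int) ∧ (j : Int) < b
        · rw [if_pos h2, if_pos (by omega)]
        · rw [if_neg h2, if_neg (by omega)]

theorem scatter_cells_getElem? (j : Nat) (v a b : Int) (ha : 0 ≤ a) (tab : List (List Int)) :
    ((PySem.List.pyRange a b 1).foldl (fun tab c => tab.modify c.toNat (fun cl => cl ++ [v])) tab)[j]? =
      tab[j]?.map (fun cl => if a ≤ (j : Int) ∧ (j : Int) < b then cl ++ [v] else cl) :=
  scatter_cells_getElem?_aux j v (b - a).toNat a b ha rfl tab

-- An interval filter of range(lo, up) is range(max, min).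
theorem filter_pyRange_interval (A B : Int) :
    ∀ (n : Nat) (lo up : Int), n = (up - lo).toNat →
      (PySem.List.pyRange lo up 1).filter (fun s => decide (A ≤ s ∧ s < B)) =
        PySem.List.pyRange (max A lo) (min B up) 1 := by
  intro n
  induction n with
  | zero =>
    intro lo up hn
    rw [PySem.List.pyRange_one_eq_nil (by omega), PySem.List.pyRange_one_eq_nil (by omega)]
    simp
  | succ n ih =>
    intro lo up hn
    have hlu : lo < up := by omega
    rw [PySem.List.pyRange_one_cons hlu]
    rw [List.filter_cons]
    rw [ih (lo + 1) up (by omega)]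
    by_cases h : A ≤ lo ∧ lo < B
    · rw [if_pos (by simpa using h)]
      have h1 : max A lo = lo := by omega
      have h2 : max A (lo + 1) = lo + 1 := by omega
      rw [h1, h2]
      exact (PySem.List.pyRange_one_cons (by omega)).symm
    · rw [if_neg (by simpa using h)]
      rcases not_and_or.mp h with h' | h'
      · have h1 : max A (lo + 1) = max A lo := by omega
        rw [h1]
      · rw [PySem.List.pyRange_one_eq_nil (by omega), PySem.List.pyRange_one_eq_nil (by omega)]

-- One whole pattern's scatter, seen from a fixed cell j (0 ≤ j < size): it appends
-- exactly the window literals that A gathers for cell j.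
theorem scatter_pattern_getElem? (size len pid : Int) (j : Nat) (hj : (j : Int) < size) :
    ∀ (n : Nat) (lo up : Int), n = (up - lo).toNat → ∀ (tab : List (List Int)),
      ((PySem.List.pyRange lo up 1).foldl (fun tab s =>
          (PySem.List.pyRange (max s 0) (min (s + len) size) 1).foldl
            (fun tab c => tab.modify c.toNat (fun cl => cl ++ [pid + s])) tab) tab)[j]? =
        tab[j]?.map (fun cl => cl ++ (windowL lo up len (j : Int)).map (fun s => pid + s)) := by
  intro n
  induction n with
  | zero =>
    intro lo up hn tab
    rw [PySem.List.pyRange_one_eq_nil (a := lo) (by omega)]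
    unfold windowL
    rw [PySem.List.pyRange_one_eq_nil (by omega)]
    simp only [List.foldl_nil]
    cases tab[j]? <;> simp
  | succ n ih =>
    intro lo up hn tab
    have hlu : lo < up := by omega
    rw [PySem.List.pyRange_one_cons hlu]
    simp only [List.foldl_cons]
    rw [ih (lo + 1) up (by omega)]
    rw [scatter_cells_getElem? j (pid + lo) (max lo 0) (min (lo + len) size) (by omega) tab]
    unfold windowL
    have hw : PySem.List.pyRange (max ((j : Int) - len + 1) lo) (min ((j : Int) + 1) up) 1 =
        (PySem.List.pyRange lo up 1).filter
          (fun s => decide ((j : Int) - len + 1 ≤ s ∧ s < (j : Int) + 1)) := by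
      rw [filter_pyRange_interval _ _ (up - lo).toNat lo up rfl]
    rw [hw, PySem.List.pyRange_one_cons hlu, List.filter_cons]
    have hw2 : PySem.List.pyRange (max ((j : Int) - len + 1) (lo + 1)) (min ((j : Int) + 1) up) 1 =
        (PySem.List.pyRange (lo + 1) up 1).filter
          (fun s => decide ((j : Int) - len + 1 ≤ s ∧ s < (j : Int) + 1)) := by
      rw [filter_pyRange_interval _ _ (up - (lo + 1)).toNat (lo + 1) up rfl]
    rw [hw2]
    cases tab[j]? <;> simp only [Option.map_none, Option.map_some, Option.some.injEq]
    by_cases h : max lo 0 ≤ (j : Int) ∧ (j : Int) < min (lo + len) size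
    · rw [if_pos h, if_pos (by simp; omega)]
      simp
    · rw [if_neg h, if_neg (by simp; omega)]

-- Folding any per-pattern step that appends g p to cell j appends ps.flatMap g.
theorem foldl_step_getElem? {α : Type} (step : List (List Int) → α → List (List Int))
    (g : α → List Int) (j : Nat)
    (h : ∀ (tab : List (List Int)) (p : α), (step tab p)[j]? = tab[j]?.map (fun cl => cl ++ g p)) :
    ∀ (ps : List α) (tab : List (List Int)),
      (ps.foldl step tab)[j]? = tab[j]?.map (fun cl => cl ++ ps.flatMap g) := by
  intro ps
  induction ps with
  | nil =>
    intro tab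
    simp only [List.foldl_nil]
    cases tab[j]? <;> simp
  | cons p ps ih =>
    intro tab
    simp only [List.foldl_cons]
    rw [ih, h]
    cases tab[j]? <;> simp

-- B's scatter table, read at cell j, is A's gathered clause.
theorem scatterB_getElem? (size base stride : Int) (pats : List Int) (rngs : List (Int × Int))
    (ids : List Int) (j : Nat) (hj : (j : Int) < size) :
    (scatterB size base stride pats rngs ids)[j]? =
      some (gatherClause (-(base + (j : Int) * stride)) pats rngs ids (j : Int)) := by
  unfold scatterB
  rw [foldl_step_getElem? _ (fun p =>
      (windowL (PySem.List.pyGetD rngs p (0, 0)).1 (PySem.List.pyGetD rngs p (0, 0)).2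
        (PySem.List.pyGetD pats p 0) (j : Int)).map (fun s => PySem.List.pyGetD ids p 0 + s)) j
      (fun tab p =>
        scatter_pattern_getElem? size (PySem.List.pyGetD pats p 0) (PySem.List.pyGetD ids p 0) j hj
          ((PySem.List.pyGetD rngs p (0, 0)).2 - (PySem.List.pyGetD rngs p (0, 0)).1).toNat
          (PySem.List.pyGetD rngs p (0, 0)).1 (PySem.List.pyGetD rngs p (0, 0)).2 rfl tab)]
  rw [List.getElem?_map, PySem.List.getElem?_pyRange_one]
  rw [if_pos (by omega)]
  simp [gatherClause]

-- The two ports agree on every input.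
theorem cell_shade_eq (size : Int) (rows : List (List Int)) (cols : List (List Int))
    (rows_range : List (List (Int × Int))) (cols_range : List (List (Int × Int)))
    (rows_id : List (List Int)) (cols_id : List (List Int)) :
    cell_shade size rows cols rows_range cols_range rows_id cols_id =
      cell_shade_alt size rows cols rows_range cols_range rows_id cols_id := by
  unfold cell_shade cell_shade_alt
  apply PySem.List.foldl_congr_mem
  intro acc r hr
  apply PySem.List.foldl_congr_mem
  intro acc2 c hc
  obtain ⟨hr0, hrs⟩ := PySem.List.mem_pyRange_one.mp hr
  obtain ⟨hc0, hcs⟩ := PySem.List.mem_pyRange_one.mp hc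
  have hgid : grid_id size r c = r * size + c + 1 := by
    unfold grid_id; rw [if_neg (by omega)]
  -- row-table lookup = row gather clause
  have hrow : PySem.List.pyGetD (PySem.List.pyGetD
      ((PySem.List.pyRange 0 size 1).map (fun r =>
        scatterB size (r * size + 1) 1 (PySem.List.pyGetD rows r [])
          (PySem.List.pyGetD rows_range r []) (PySem.List.pyGetD rows_id r []))) r []) c [] =
      gatherClause (-(r * size + c + 1)) (PySem.List.pyGetD rows r [])
        (PySem.List.pyGetD rows_range r []) (PySem.List.pyGetD rows_id r []) c := by
    rw [PySem.List.pyGetD_map_pyRange_of_nonneg _ size r [] hr0 hrs]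
    have hcnat : c = ((c.toNat : Nat) : Int) := by omega
    rw [hcnat, PySem.List.pyGetD_natCast, List.getD_eq_getElem?_getD,
      scatterB_getElem? size (r * size + 1) 1 _ _ _ c.toNat (by omega)]
    simp only [Option.getD_some]
    congr 1
    omega
  -- column-table lookup = column gather clause
  have hcol : PySem.List.pyGetD (PySem.List.pyGetD
      ((PySem.List.pyRange 0 size 1).map (fun c =>
        scatterB size (c + 1) size (PySem.List.pyGetD cols c [])
          (PySem.List.pyGetD cols_range c []) (PySem.List.pyGetD cols_id c []))) c []) r [] =
      gatherClause (-(r * size + c + 1)) (PySem.List.pyGetD cols c [])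
        (PySem.List.pyGetD cols_range c []) (PySem.List.pyGetD cols_id c []) r := by
    rw [PySem.List.pyGetD_map_pyRange_of_nonneg _ size c [] hc0 hcs]
    have hrnat : r = ((r.toNat : Nat) : Int) := by omega
    rw [hrnat, PySem.List.pyGetD_natCast, List.getD_eq_getElem?_getD,
      scatterB_getElem? size (c + 1) size _ _ _ r.toNat (by omega)]
    simp only [Option.getD_some]
    congr 1
    omega
  simp only [hgid, a_clause, hrow, hcol]

-- ===== VERDICT (by name: the statement is the Claim_ definition above) =====
theorem cell_shade_spec : Claim_equal_cell_shade := by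
  intro size rows cols rows_range cols_range rows_id cols_id _ _
  unfold Spec_cell_shade
  exact cell_shade_eq size rows cols rows_range cols_range rows_id cols_id
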